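-- pv_equiv track=rewrite | github.com/yasufumi-nakata/Pytra | tools/strip_east1_type_info.py | _denormalize_type
-- ===== SOURCE A (Python) =====
-- _DENORMALIZE_TYPES: dict[str, str] = {
--     "int64": "int",
--     "float64": "float",
--     "uint8": "byte",
--     "bool": "bool",
--     "str": "str",
--     "None": "None",
-- }
--
-- def _denormalize_type(t: str) -> str:
--     """正規化済み型を Python ソース型に戻す。"""
--     if t in _DENORMALIZE_TYPES:
--         return _DENORMALIZE_TYPES[t]
--     # list[int64] → list[int] 等
--     if "[" in t:
--         bracket = t.index("[")
--         base = t[:bracket]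
--         inner = t[bracket + 1:-1]
--         parts = _split_top_level(inner, ",")
--         denormed = [_denormalize_type(p.strip()) for p in parts]
--         return base + "[" + ", ".join(denormed) + "]"
--     return t
--
-- def _split_top_level(text: str, sep: str) -> list[str]:
--     """トップレベルのセパレータで分割（ネスト考慮）。"""
--     out: list[str] = []
--     depth = 0
--     current = ""
--     for ch in text:
--         if ch == "[" or ch == "(":
--             depth += 1
--         elif ch == "]" or ch == ")":
--             depth -= 1
--         if ch == sep and depth == 0:
--             out.append(current)
--             current = ""
--         else:
--             current += ch
--     if current:
--         out.append(current)
--     return out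
-- ===== SOURCE B (Python) =====
-- _DENORMALIZE_TYPES: dict[str, str] = {
--     "int64": "int",
--     "float64": "float",
--     "uint8": "byte",
--     "bool": "bool",
--     "str": "str",
--     "None": "None",
-- }
--
--
-- def _top_parts(text: str) -> list[str]:
--     """Top-level comma split done with slice indices in one pass (no char-by-char
--     accumulator): remember where the current piece starts, cut at each depth-0 comma."""
--     parts: list[str] = []
--     depth = 0
--     start = 0
--     for i, ch in enumerate(text):
--         if ch == "[" or ch == "(":
--             depth += 1
--         elif ch == "]" or ch == ")":
--             depth -= 1
--         if ch == "," and depth == 0: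
--             parts.append(text[start:i])
--             start = i + 1
--     if start < len(text):
--         parts.append(text[start:])
--     return parts
--
--
-- def _denormalize_type(t: str) -> str:
--     """Iterative denormalization: an explicit work stack of eval/build frames
--     replaces the recursion (defunctionalized evaluator)."""
--     work = [("eval", t)]
--     results: list[str] = []
--     while work:
--         tag, payload = work.pop()
--         if tag == "eval":
--             s = payload
--             if s in _DENORMALIZE_TYPES:
--                 results.append(_DENORMALIZE_TYPES[s])
--             elif "[" in s:
--                 i = s.index("[")
--                 parts = _top_parts(s[i + 1:-1])
--                 work.append(("build", (s[:i], len(parts))))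
--                 for p in reversed(parts):
--                     work.append(("eval", p.strip()))
--             else:
--                 results.append(s)
--         else:
--             base, n = payload
--             kids = results[len(results) - n:]
--             del results[len(results) - n:]
--             results.append(base + "[" + ", ".join(kids) + "]")
--     return results[-1]
-- ===== Notes on version B (the rewrite author's own statement) =====
-- stated objective: alternative
-- what changed: A's recursive descent (recurse on each stripped top-level part) with an accumulator-based splitter is replaced by a non-recursive defunctionalized evaluator: an explicit work stack of eval/build frames driven by a while loop, with the top-level comma split done by slice indices in one enumerate pass.
import Mathlib
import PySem

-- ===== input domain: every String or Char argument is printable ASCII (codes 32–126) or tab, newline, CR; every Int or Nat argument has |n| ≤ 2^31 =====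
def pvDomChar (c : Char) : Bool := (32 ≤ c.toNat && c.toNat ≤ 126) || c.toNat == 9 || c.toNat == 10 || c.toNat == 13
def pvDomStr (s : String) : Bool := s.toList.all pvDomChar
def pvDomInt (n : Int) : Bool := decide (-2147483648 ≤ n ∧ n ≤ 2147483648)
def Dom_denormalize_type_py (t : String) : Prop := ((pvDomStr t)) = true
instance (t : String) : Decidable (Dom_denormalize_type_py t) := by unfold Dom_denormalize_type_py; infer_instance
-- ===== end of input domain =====

-- B replaces A's recursion-plus-accumulator-split by an explicit eval/build work stack
-- (a defunctionalized evaluator) and a slice-index top-level split (objective: alternative).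
-- Both ports work on List Char (PySem's string ops are defined on List Char); the String
-- wrappers only convert at the boundary.

-- ===== PORT A =====

-- the module constant _DENORMALIZE_TYPES (dict with distinct string keys)
def pvTable : List (List Char × List Char) :=
  [("int64".toList, "int".toList), ("float64".toList, "float".toList),
   ("uint8".toList, "byte".toList), ("bool".toList, "bool".toList),
   ("str".toList, "str".toList), ("None".toList, "None".toList)]

-- one iteration of _split_top_level's for-loop: state (out, depth, current);
-- the depth update happens first (its own if/elif in Python), then the sep test
def splitStepA (sep : Char) (st : List (List Char) × Int × List Char) (ch : Char) :
    List (List Char) × Int × List Char :=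
  let d := if ch = '[' ∨ ch = '(' then st.2.1 + 1
           else if ch = ']' ∨ ch = ')' then st.2.1 - 1 else st.2.1
  if ch = sep ∧ d = 0 then (st.1 ++ [st.2.2], d, [])
  else (st.1, d, st.2.2 ++ [ch])

-- the trailing 'if current: out.append(current)' of _split_top_level
def splitFinishA (st : List (List Char) × Int × List Char) : List (List Char) :=
  if st.2.2 ≠ [] then st.1 ++ [st.2.2] else st.1

-- _split_top_level(text, sep)
def splitTopLevelA (text : List Char) (sep : Char) : List (List Char) :=
  splitFinishA (text.foldl (splitStepA sep) ([], 0, []))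

-- (the next three lemmas are cited by the recursive port's decreasing_by: pieces of
-- the split are no longer than the split text, and strip never lengthens)
theorem pv_splitStepA_cases (sep c : Char) (st : List (List Char) × Int × List Char) :
    splitStepA sep st c = (st.1 ++ [st.2.2], (splitStepA sep st c).2.1, []) ∨
    splitStepA sep st c = (st.1, (splitStepA sep st c).2.1, st.2.2 ++ [c]) := by
  simp only [splitStepA]
  split_ifs <;> simp

theorem pv_foldA_len (sep : Char) (text : List Char) :
    ∀ st : List (List Char) × Int × List Char,
      (∀ q ∈ (text.foldl (splitStepA sep) st).1,
          q ∈ st.1 ∨ q.length ≤ st.2.2.length + text.length) ∧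
      (text.foldl (splitStepA sep) st).2.2.length ≤ st.2.2.length + text.length := by
  induction text with
  | nil =>
    intro st
    simp only [List.foldl_nil, List.length_nil]
    exact ⟨fun q hq => Or.inl hq, by omega⟩
  | cons c t ih =>
    intro st
    rw [List.foldl_cons]
    obtain ⟨ha, hb⟩ := ih (splitStepA sep st c)
    rcases pv_splitStepA_cases sep c st with h | h <;> rw [h] at ha hb ⊢
    · constructor
      · intro q hq
        rcases ha q hq with h' | h'
        · simp only [List.mem_append, List.mem_singleton] at h'
          rcases h' with h'' | h''
          · exact Or.inl h''
          · subst h''; right; simp only [List.length_cons]; omega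
        · right
          simp only [List.length_nil, List.length_cons] at h' ⊢
          omega
      · simp only [List.length_nil, List.length_cons] at hb ⊢
        omega
    · constructor
      · intro q hq
        rcases ha q hq with h' | h'
        · exact Or.inl h'
        · right
          simp only [List.length_append, List.length_cons, List.length_nil] at h' ⊢
          omega
      · simp only [List.length_append, List.length_cons, List.length_nil] at hb ⊢
        omega

theorem pv_mem_split_len {p text : List Char} {sep : Char}
    (hp : p ∈ splitTopLevelA text sep) : p.length ≤ text.length := by
  obtain ⟨ha, hb⟩ := pv_foldA_len sep text ([], 0, [])
  unfold splitTopLevelA splitFinishA at hp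
  split_ifs at hp with h
  · rcases List.mem_append.1 hp with h' | h'
    · rcases ha p h' with h'' | h''
      · simp at h''
      · simpa using h''
    · simp at h'; subst h'; simpa using hb
  · rcases ha p hp with h'' | h''
    · simp at h''
    · simpa using h''

theorem pv_strip_len_le (cs : List Char) : (PySem.Chars.strip cs).length ≤ cs.length := by
  simp only [PySem.Chars.strip, PySem.Chars.rstrip, PySem.Chars.lstrip]
  calc (List.dropWhile PySem.Chars.isspace
          (List.dropWhile PySem.Chars.isspace cs).reverse).reverse.length
      ≤ (List.dropWhile PySem.Chars.isspace cs).reverse.length := by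
        rw [List.length_reverse]; exact List.length_dropWhile_le _ _
    _ ≤ cs.length := by rw [List.length_reverse]; exact List.length_dropWhile_le _ _

-- _denormalize_type(t) on chars: whole-string lookup first, else recurse into the
-- bracket body.  t.index("[") and '"[" in t' are the single-char forms (exact);
-- t[:bracket] = take bracket; t[bracket+1:-1] = PySem.List.slice
def denormA (cs : List Char) : List Char :=
  match pvTable.lookup cs with
  | some v => v
  | none =>
    if h : '[' ∈ cs then
      let bracket := cs.idxOf '['
      let base := cs.take bracket
      let inner := PySem.List.slice cs (some ((bracket : Int) + 1)) (some (-1))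
      let denormed := (splitTopLevelA inner ',').attach.map
        (fun p => denormA (PySem.Chars.strip p.1))
      base ++ '[' :: PySem.Chars.join [',', ' '] denormed ++ [']']
    else cs
termination_by cs.length
decreasing_by
  have h1 : (PySem.Chars.strip p.1).length ≤ p.1.length := pv_strip_len_le _
  have h2 : p.1.length ≤ inner.length := pv_mem_split_len p.2
  have h3 : inner.length ≤ cs.length - 1 := by
    simp only [inner, PySem.List.length_slice, PySem.List.clampIdx_neg_one]; omega
  have h4 : cs ≠ [] := by rintro rfl; simp at h
  have h5 : 0 < cs.length := List.length_pos_iff.2 h4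
  omega

def denormalize_type_py (t : String) : String := String.ofList (denormA t.toList)

-- ===== PORT B =====

-- a work item of Source B's explicit stack: ("eval", s) or ("build", (base, n))
inductive DItem where
  | eval : List Char → DItem
  | build : List Char → Nat → DItem

-- one iteration of _top_parts' for-loop over enumerate(text): state (parts, depth, start);
-- text[start:i] = (text.drop start).take (i - start) (indices are in range: start ≤ i ≤ len)
def topPartsStep (text : List Char) (st : List (List Char) × Int × Nat) (p : Char × Nat) :
    List (List Char) × Int × Nat :=
  let d := if p.1 = '[' ∨ p.1 = '(' then st.2.1 + 1
           else if p.1 = ']' ∨ p.1 = ')' then st.2.1 - 1 else st.2.1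
  if p.1 = ',' ∧ d = 0 then
    (st.1 ++ [(text.drop st.2.2).take (p.2 - st.2.2)], d, p.2 + 1)
  else (st.1, d, st.2.2)

-- _top_parts(text); enumerate ported with Nat indices (exact: they run over 0..len-1);
-- text[start:] = drop start
-- the trailing 'if start < len(text): parts.append(text[start:])' of _top_parts
def topFinishB (text : List Char) (st : List (List Char) × Int × Nat) : List (List Char) :=
  if st.2.2 < text.length then st.1 ++ [text.drop st.2.2] else st.1

def topParts (text : List Char) : List (List Char) :=
  topFinishB text (text.zipIdx.foldl (topPartsStep text) ([], 0, 0))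

-- the while-loop of Source B; the Python list `work` pushes/pops at its END, modeled with
-- head = top of stack; `results` appends at its end, `results[len-n:]` /
-- `del results[len-n:]` are drop/take.  fuel only makes the loop structurally
-- recursive; pv_runB_denote below shows the chosen fuel is never exhausted.
def runB (fuel : Nat) (work : List DItem) (results : List (List Char)) :
    List (List Char) :=
  match fuel, work with
  | 0, _ => results
  | _ + 1, [] => results
  | f + 1, DItem.eval s :: w =>
    (match pvTable.lookup s with
     | some v => runB f w (results ++ [v])
     | none =>
       if '[' ∈ s then
         let i := s.idxOf '['
         let parts := topParts (PySem.List.slice s (some ((i : Int) + 1)) (some (-1)))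
         runB f (parts.map (fun p => DItem.eval (PySem.Chars.strip p)) ++
                  [DItem.build (s.take i) parts.length] ++ w) results
       else runB f w (results ++ [s]))
  | f + 1, DItem.build base n :: w =>
    runB f w (results.take (results.length - n) ++
      [base ++ '[' :: PySem.Chars.join [',', ' ']
        (results.drop (results.length - n)) ++ [']']])

-- _denormalize_type(t) of Source B; results[-1] is the last element (the loop always
-- ends with exactly one result, so getLastD's default is never used)
def denormB (cs : List Char) : List Char :=
  (runB (3 * cs.length + 4) [DItem.eval cs] []).getLastD []

def denormalize_type_py_alt (t : String) : String := String.ofList (denormB t.toList)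

-- ===== PRECONDITION & SPEC =====
def Spec_denormalize_type_py (t : String) (out : String) : Prop := out = denormalize_type_py_alt t
instance (t : String) (out : String) : Decidable (Spec_denormalize_type_py t out) := by unfold Spec_denormalize_type_py; infer_instance

-- ===== CLAIM (what is proved, stated in full; the proofs are below) =====
def Claim_equal_denormalize_type_py : Prop := ∀ (t : String), Dom_denormalize_type_py t → Spec_denormalize_type_py t (denormalize_type_py t)

-- ===== LEMMAS AND PROOFS =====

-- one step of B's split loop simulates one step of A's split loop
theorem pv_step_rel (text : List Char) (out : List (List Char)) (d : Int)
    (start i : Nat) (hs : start ≤ i) (hi : i < text.length) :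
    (splitStepA ',' (out, d, (text.drop start).take (i - start)) text[i]).1 =
      (topPartsStep text (out, d, start) (text[i], i)).1 ∧
    (splitStepA ',' (out, d, (text.drop start).take (i - start)) text[i]).2.1 =
      (topPartsStep text (out, d, start) (text[i], i)).2.1 ∧
    (topPartsStep text (out, d, start) (text[i], i)).2.2 ≤ i + 1 ∧
    (splitStepA ',' (out, d, (text.drop start).take (i - start)) text[i]).2.2 =
      (text.drop (topPartsStep text (out, d, start) (text[i], i)).2.2).take
        ((i + 1) - (topPartsStep text (out, d, start) (text[i], i)).2.2) := by
  have hext : (text.drop start).take (i - start) ++ [text[i]] =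
      (text.drop start).take ((i + 1) - start) := by
    have h3 : (i + 1) - start = (i - start) + 1 := by omega
    rw [h3, List.take_add_one]
    have h4 : (text.drop start)[i - start]? = some text[i] := by
      rw [List.getElem?_drop]
      have h5 : start + (i - start) = i := by omega
      rw [h5, List.getElem?_eq_getElem hi]
    rw [h4]
    rfl
  simp only [splitStepA, topPartsStep]
  split_ifs
  all_goals refine ⟨rfl, rfl, ?_, ?_⟩
  all_goals dsimp only
  all_goals first
    | omega
    | exact (by simp)
    | exact hext

-- B's slice-index split loop computes A's accumulated split loop
theorem pv_relSplit (n : Nat) : ∀ (text : List Char) (i0 start : Nat)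
    (out : List (List Char)) (d : Int),
    i0 + n = text.length → start ≤ i0 →
    ((text.drop i0).foldl (splitStepA ',')
        (out, d, (text.drop start).take (i0 - start))).1 =
      (((text.drop i0).zipIdx i0).foldl (topPartsStep text) (out, d, start)).1 ∧
    (((text.drop i0).zipIdx i0).foldl (topPartsStep text) (out, d, start)).2.2 ≤
      text.length ∧
    ((text.drop i0).foldl (splitStepA ',')
        (out, d, (text.drop start).take (i0 - start))).2.2 =
      text.drop ((((text.drop i0).zipIdx i0).foldl (topPartsStep text)
        (out, d, start)).2.2) := by
  induction n with
  | zero =>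
    intro text i0 start out d h0 h1
    have hd : text.drop i0 = [] := List.drop_eq_nil_of_le (by omega)
    rw [hd]
    simp only [List.zipIdx_nil, List.foldl_nil]
    refine ⟨by trivial, ?_, ?_⟩
    · dsimp only; omega
    · have h2 : i0 - start = (text.drop start).length := by simp; omega
      show (text.drop start).take (i0 - start) = text.drop start
      rw [h2, List.take_length]
  | succ m ih =>
    intro text i0 start out d h0 h1
    have hi : i0 < text.length := by omega
    rw [List.drop_eq_getElem_cons hi, List.zipIdx_cons, List.foldl_cons, List.foldl_cons]
    obtain ⟨e1, e2, e3, e4⟩ := pv_step_rel text out d start i0 h1 hi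
    have hA : splitStepA ',' (out, d, (text.drop start).take (i0 - start)) text[i0] =
        ((topPartsStep text (out, d, start) (text[i0], i0)).1,
         (topPartsStep text (out, d, start) (text[i0], i0)).2.1,
         (text.drop (topPartsStep text (out, d, start) (text[i0], i0)).2.2).take
           ((i0 + 1) - (topPartsStep text (out, d, start) (text[i0], i0)).2.2)) := by
      rw [← e1, ← e2, ← e4]
    have key := ih text (i0 + 1) (topPartsStep text (out, d, start) (text[i0], i0)).2.2
      (topPartsStep text (out, d, start) (text[i0], i0)).1
      (topPartsStep text (out, d, start) (text[i0], i0)).2.1 (by omega) e3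
    rw [hA]
    exact key

theorem pv_topParts_eq (text : List Char) : topParts text = splitTopLevelA text ',' := by
  have h := pv_relSplit text.length text 0 0 [] 0 (by omega) (le_refl 0)
  simp only [List.drop_zero, Nat.sub_self, List.take_zero] at h
  obtain ⟨h1, h2, h3⟩ := h
  unfold topParts splitTopLevelA topFinishB splitFinishA
  rw [h1, h3]
  by_cases hlt : ((text.zipIdx.foldl (topPartsStep text) ([], 0, 0)).2.2) < text.length
  · rw [if_pos hlt, if_pos]
    simp only [ne_eq, List.drop_eq_nil_iff]
    omega
  · rw [if_neg hlt, if_neg]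
    simp only [ne_eq, List.drop_eq_nil_iff, not_not]
    omega

-- item costs: the machine's fuel bookkeeping
def pvCost : DItem → Nat
  | .eval s => 3 * s.length + 3
  | .build _ _ => 1

def pvCosts (w : List DItem) : Nat := (w.map pvCost).sum

def pvS (l : List (List Char)) : Nat := (l.map (fun p => 3 * p.length + 3)).sum

theorem pv_foldA_cost (sep : Char) (text : List Char) :
    ∀ st : List (List Char) × Int × List Char,
      pvS ((text.foldl (splitStepA sep) st).1) +
        3 * (text.foldl (splitStepA sep) st).2.2.length ≤
      pvS st.1 + 3 * st.2.2.length + 3 * text.length := by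
  induction text with
  | nil => intro st; simp
  | cons c t ih =>
    intro st
    rw [List.foldl_cons]
    have hI := ih (splitStepA sep st c)
    rcases pv_splitStepA_cases sep c st with h | h <;> rw [h] at hI ⊢ <;>
      simp only [pvS, List.map_append, List.sum_append, List.map_cons, List.map_nil,
        List.sum_cons, List.sum_nil, List.length_append, List.length_cons,
        List.length_nil] at hI ⊢ <;> omega

theorem pv_split_cost (text : List Char) (sep : Char) :
    pvS (splitTopLevelA text sep) ≤ 3 * text.length + 3 := by
  have h := pv_foldA_cost sep text ([], 0, [])
  unfold splitTopLevelA splitFinishA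
  split_ifs with hne <;>
    simp only [pvS, List.map_append, List.sum_append, List.map_cons, List.map_nil,
      List.sum_cons, List.sum_nil, List.length_nil] at h ⊢ <;> omega

-- the denotation of a work stack: what the machine is still going to compute, with
-- A's recursive function as the meaning of an eval frame (proof device only)
def pvDenote : List DItem → List (List Char) → List (List Char)
  | [], r => r
  | DItem.eval s :: w, r => pvDenote w (r ++ [denormA s])
  | DItem.build base n :: w, r =>
    pvDenote w (r.take (r.length - n) ++
      [base ++ '[' :: PySem.Chars.join [',', ' '] (r.drop (r.length - n)) ++ [']']])

theorem pv_denote_evals (ps : List (List Char)) :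
    ∀ (w : List DItem) (r : List (List Char)),
      pvDenote (ps.map (fun p => DItem.eval (PySem.Chars.strip p)) ++ w) r =
      pvDenote w (r ++ ps.map (fun p => denormA (PySem.Chars.strip p))) := by
  induction ps with
  | nil => intro w r; simp
  | cons p t ih =>
    intro w r
    simp only [List.map_cons, List.cons_append, pvDenote]
    rw [ih]
    simp

theorem pv_denormA_bracket (s : List Char) (hl : pvTable.lookup s = none)
    (hb : '[' ∈ s) :
    denormA s = s.take (s.idxOf '[') ++ '[' ::
      PySem.Chars.join [',', ' ']
        ((splitTopLevelA (PySem.List.slice s (some ((s.idxOf '[' : Int) + 1))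
            (some (-1))) ',').map (fun p => denormA (PySem.Chars.strip p))) ++ [']'] := by
  rw [denormA, hl]
  simp only [hb, dif_pos]
  rw [List.attach_map_val (l := splitTopLevelA (PySem.List.slice s
    (some ((s.idxOf '[' : Int) + 1)) (some (-1))) ',')
    (f := fun p => denormA (PySem.Chars.strip p))]

-- the machine computes the denotation whenever it has enough fuel
theorem pv_runB_denote : ∀ (fuel : Nat) (w : List DItem) (r : List (List Char)),
    pvCosts w ≤ fuel → runB fuel w r = pvDenote w r := by
  intro fuel
  induction fuel with
  | zero =>
    intro w r h
    cases w with
    | nil => simp [runB, pvDenote]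
    | cons item w =>
      exfalso
      cases item <;> simp [pvCosts, pvCost] at h
  | succ f ih =>
    intro w r h
    cases w with
    | nil => simp [runB, pvDenote]
    | cons item w =>
      cases item with
      | eval s =>
        have hc : pvCosts (DItem.eval s :: w) = 3 * s.length + 3 + pvCosts w := by
          simp [pvCosts, pvCost]
        rw [hc] at h
        simp only [runB]
        cases hl : pvTable.lookup s with
        | some v =>
          dsimp only
          rw [ih w (r ++ [v]) (by omega)]
          simp only [pvDenote]
          have : denormA s = v := by rw [denormA, hl]
          rw [this]
        | none =>
          dsimp only
          by_cases hb : '[' ∈ s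
          · rw [if_pos hb]
            rw [pv_topParts_eq]
            set inner := PySem.List.slice s (some ((s.idxOf '[' : Int) + 1)) (some (-1))
              with hinner
            have hlen : inner.length ≤ s.length - 1 := by
              rw [hinner]
              simp only [PySem.List.length_slice, PySem.List.clampIdx_neg_one]; omega
            have hpos : 0 < s.length := by
              cases s with
              | nil => simp at hb
              | cons a t => simp
            have h2 : pvCosts ((splitTopLevelA inner ',').map
                (fun p => DItem.eval (PySem.Chars.strip p))) ≤
                pvS (splitTopLevelA inner ',') := by
              simp only [pvCosts, pvS, List.map_map]
              apply List.sum_le_sum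
              intro p hp
              simp only [Function.comp_apply, pvCost]
              have := pv_strip_len_le p
              omega
            have h3 := pv_split_cost inner ','
            have h4 : pvCosts ((splitTopLevelA inner ',').map
                (fun p => DItem.eval (PySem.Chars.strip p)) ++
                [DItem.build (s.take (s.idxOf '['))
                  (splitTopLevelA inner ',').length] ++ w) =
                pvCosts ((splitTopLevelA inner ',').map
                  (fun p => DItem.eval (PySem.Chars.strip p))) + 1 + pvCosts w := by
              simp only [pvCosts, pvCost, List.map_append, List.sum_append,
                List.map_cons, List.map_nil, List.sum_cons, List.sum_nil]
              omega
            rw [ih _ r (by omega)]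
            rw [List.append_assoc, List.singleton_append, pv_denote_evals]
            simp only [pvDenote]
            have hlen2 : (r ++ (splitTopLevelA inner ',').map
                (fun p => denormA (PySem.Chars.strip p))).length -
                (splitTopLevelA inner ',').length = r.length := by
              simp
            rw [hlen2, List.take_left, List.drop_left]
            suffices hfin : s.take (s.idxOf '[') ++ '[' ::
                PySem.Chars.join [',', ' ']
                  ((splitTopLevelA inner ',').map
                    (fun p => denormA (PySem.Chars.strip p))) ++ [']'] = denormA s by
              rw [hfin]
            rw [pv_denormA_bracket s hl hb, hinner]
          · rw [if_neg hb]
            rw [ih w (r ++ [s]) (by omega)]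
            simp only [pvDenote]
            have : denormA s = s := by rw [denormA, hl]; simp [hb]
            rw [this]
      | build base n =>
        have hc : pvCosts (DItem.build base n :: w) = 1 + pvCosts w := by
          simp [pvCosts, pvCost]
        rw [hc] at h
        simp only [runB]
        rw [ih _ _ (by omega)]
        simp only [pvDenote]

theorem pv_denormB_eq (cs : List Char) : denormB cs = denormA cs := by
  unfold denormB
  rw [pv_runB_denote (3 * cs.length + 4) [DItem.eval cs] [] (by simp [pvCosts, pvCost])]
  simp [pvDenote]

-- ===== VERDICT (by name: the statement is the Claim_ definition above) =====
theorem denormalize_type_py_spec : Claim_equal_denormalize_type_py := by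
  intro t _
  unfold Spec_denormalize_type_py denormalize_type_py denormalize_type_py_alt
  rw [pv_denormB_eq]
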